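-- pv_equiv track=rewrite | github.com/Maitgon/AOC2025-Python | days/day06.py | part1
-- ===== SOURCE A (Python) =====
-- from functools import reduce
--
-- def part1(data):
--     data = [line.split() for line in data]
--     sol1 = 0
--     for j in range(0, len(data[0])):
--         nums = [int(pos[j]) for pos in data[0:-1]]
--         operand = data[-1][j]
--         if operand == '+':
--             sol1 += reduce(lambda x, y: x + y, nums, 0)
--         elif operand == '*':
--             sol1 += reduce(lambda x, y: x * y, nums, 1)
--     return sol1
-- ===== SOURCE B (Python) =====
-- def part1(data):
--     rows = [line.split() for line in data]
--     n = len(rows[0])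
--     # row-major sweep: accumulate per-column sums and products simultaneously,
--     # then select per column according to the operator row.
--     sums = [0] * n
--     prods = [1] * n
--     for row in rows[:-1]:
--         vals = [int(x) for x in row[:n]]
--         sums = [s + v for s, v in zip(sums, vals)]
--         prods = [p * v for p, v in zip(prods, vals)]
--     total = 0
--     for j, op in enumerate(rows[-1][:n]):
--         if op == '+':
--             total += sums[j]
--         elif op == '*':
--             total += prods[j]
--     return total
-- ===== Notes on version B (the rewrite author's own statement) =====
-- stated objective: alternative
-- what changed: B replaces A's column-at-a-time traversal (re-scanning all rows for each column index j and reducing that column) by a single row-major sweep that maintains per-column sum and product accumulator vectors simultaneously, followed by one selection pass over the operator row.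
import Mathlib
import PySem

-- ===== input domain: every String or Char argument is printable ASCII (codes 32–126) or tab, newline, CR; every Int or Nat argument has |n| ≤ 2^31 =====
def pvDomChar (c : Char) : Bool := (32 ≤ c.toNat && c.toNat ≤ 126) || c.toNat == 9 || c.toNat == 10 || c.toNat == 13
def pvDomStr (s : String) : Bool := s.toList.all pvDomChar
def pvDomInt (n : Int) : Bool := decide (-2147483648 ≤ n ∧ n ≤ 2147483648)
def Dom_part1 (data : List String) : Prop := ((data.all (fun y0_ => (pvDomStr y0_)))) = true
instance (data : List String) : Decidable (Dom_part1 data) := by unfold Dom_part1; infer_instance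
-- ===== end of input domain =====

-- B sweeps the grid row by row, maintaining per-column sum and product accumulators at once,
-- then selects per column by the operator row; A re-scans all rows per column. Same cost, different traversal.

-- ===== PORT A =====
def part1 (data : List String) : Int :=
  let rows := data.map PySem.Str.split₀
  (PySem.List.pyRange 0 ((PySem.List.pyGetD rows 0 []).length : Int) 1).foldl
    (fun sol1 j =>
      let nums := (PySem.List.slice rows none (some (-1))).map
        (fun pos => (PySem.Int.ofStr? (PySem.List.pyGetD pos j "")).getD 0)
      let operand := PySem.List.pyGetD (PySem.List.pyGetD rows (-1) []) j ""
      if operand = "+" then sol1 + nums.foldl (fun x y => x + y) 0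
      else if operand = "*" then sol1 + nums.foldl (fun x y => x * y) 1
      else sol1) 0

-- ===== PORT B =====
def part1_alt (data : List String) : Int :=
  let rows := data.map PySem.Str.split₀
  let n := (PySem.List.pyGetD rows 0 []).length
  let sp := (PySem.List.slice rows none (some (-1))).foldl
    (fun (sp : List Int × List Int) row =>
      let vals := (PySem.List.slice row none (some (n : Int))).map
        (fun x => (PySem.Int.ofStr? x).getD 0)
      (List.zipWith (fun s v => s + v) sp.1 vals,
       List.zipWith (fun p v => p * v) sp.2 vals))
    (List.replicate n (0 : Int), List.replicate n (1 : Int))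
  (PySem.List.enumerate (PySem.List.slice (PySem.List.pyGetD rows (-1) []) none (some (n : Int)))).foldl
    (fun total jop =>
      if jop.2 = "+" then total + PySem.List.pyGetD sp.1 jop.1 0
      else if jop.2 = "*" then total + PySem.List.pyGetD sp.2 jop.1 0
      else total) 0

-- ===== PRECONDITION & SPEC =====
-- Pre_ excludes exactly the inputs where A raises: empty data (IndexError on data[0]),
-- a split row shorter than the first split row (IndexError), or a non-int token in a
-- used cell of a non-last row (ValueError from int()).
def Pre_part1 (data : List String) : Prop :=
  data ≠ [] ∧
  (∀ r ∈ data.map PySem.Str.split₀,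
      ((data.map PySem.Str.split₀).headD []).length ≤ r.length) ∧
  (∀ r ∈ (data.map PySem.Str.split₀).dropLast,
      ∀ t ∈ r.take ((data.map PySem.Str.split₀).headD []).length,
        (PySem.Int.ofStr? t).isSome)
instance (data : List String) : Decidable (Pre_part1 data) := by unfold Pre_part1; infer_instance

def pvWitness_part1 : List String := ["1 2 3", "4 5 6", "+ * +"]

def Spec_part1 (data : List String) (out : Int) : Prop := out = part1_alt data
instance (data : List String) (out : Int) : Decidable (Spec_part1 data out) := by unfold Spec_part1; infer_instance

-- ===== CLAIM (what is proved, stated in full; the proofs are below) =====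
def Claim_equal_part1 : Prop := ∀ (data : List String), Dom_part1 data → Pre_part1 data → Spec_part1 data (part1 data)

-- ===== LEMMAS AND PROOFS =====

def pvVal (row : List String) (j : Nat) : Int :=
  (PySem.Int.ofStr? (row.getD j "")).getD 0

theorem pvFold_inv (n : Nat) (L : List (List String)) (hL : ∀ r ∈ L, n ≤ r.length) :
    ∀ (s p : List Int), s.length = n → p.length = n →
      let res := L.foldl
        (fun (sp : List Int × List Int) row =>
          let vals := (PySem.List.slice row none (some (n : Int))).map
            (fun x => (PySem.Int.ofStr? x).getD 0)
          (List.zipWith (fun s v => s + v) sp.1 vals,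
           List.zipWith (fun p v => p * v) sp.2 vals)) (s, p)
      res.1.length = n ∧ res.2.length = n ∧
      ∀ j < n,
        res.1.getD j 0 = L.foldl (fun a row => a + pvVal row j) (s.getD j 0) ∧
        res.2.getD j 0 = L.foldl (fun a row => a * pvVal row j) (p.getD j 0) := by
  induction L with
  | nil => intro s p hs hp; exact ⟨hs, hp, fun j hj => ⟨rfl, rfl⟩⟩
  | cons row L' ih =>
    intro s p hs hp
    have hrow : n ≤ row.length := hL row (List.mem_cons_self ..)
    have hL' : ∀ r ∈ L', n ≤ r.length := fun r hr => hL r (List.mem_cons_of_mem _ hr)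
    simp only [List.foldl_cons]
    rw [PySem.List.slice_to_natCast]
    set vals := (row.take n).map (fun x => (PySem.Int.ofStr? x).getD 0) with hvals
    have hlv : vals.length = n := by simp [hvals]; omega
    have hs' : (List.zipWith (fun s v => s + v) s vals).length = n := by simp [hs, hlv]
    have hp' : (List.zipWith (fun p v => p * v) p vals).length = n := by simp [hp, hlv]
    obtain ⟨h1, h2, h3⟩ := ih hL' _ _ hs' hp'
    refine ⟨h1, h2, fun j hj => ?_⟩
    obtain ⟨e1, e2⟩ := h3 j hj
    have hv : vals.getD j 0 = pvVal row j := by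
      have hjr : j < row.length := lt_of_lt_of_le hj hrow
      rw [List.getD_eq_getElem _ _ (by omega)]
      simp [hvals, pvVal, List.getElem_take, List.getElem?_eq_getElem hjr]
    constructor
    · rw [e1]; congr 1
      rw [List.getD_eq_getElem _ _ (by omega), List.getElem_zipWith,
          ← List.getD_eq_getElem _ _ (by omega), ← List.getD_eq_getElem _ _ (by omega), hv]
    · rw [e2]; congr 1
      rw [List.getD_eq_getElem _ _ (by omega), List.getElem_zipWith,
          ← List.getD_eq_getElem _ _ (by omega), ← List.getD_eq_getElem _ _ (by omega), hv]

theorem pv_main (data : List String)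
    (hne : data ≠ [])
    (hlen : ∀ r ∈ data.map PySem.Str.split₀,
      ((data.map PySem.Str.split₀).headD []).length ≤ r.length) :
    part1 data = part1_alt data := by
  unfold part1 part1_alt
  cases hrows : data.map PySem.Str.split₀ with
  | nil => exact absurd (List.map_eq_nil_iff.mp hrows) hne
  | cons r rs =>
    rw [hrows] at hlen
    simp only [List.headD_cons] at hlen
    have hlast : (r :: rs) ≠ ([] : List (List String)) := by simp
    set n := r.length with hn
    set ops := (r :: rs).getLast hlast with hops
    have hopsmem : ops ∈ r :: rs := List.getLast_mem hlast
    have hopslen : n ≤ ops.length := hlen ops hopsmem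
    have hdroplen : ∀ row ∈ (r :: rs).dropLast, n ≤ row.length :=
      fun row hrow => hlen row (List.dropLast_subset _ hrow)
    simp only [PySem.List.pyGetD_zero_cons, PySem.List.slice_to_neg_one,
      PySem.List.pyGetD_neg_one _ _ hlast, ← hops, ← hn]
    -- B's accumulator pair
    obtain ⟨h1, h2, h3⟩ := pvFold_inv n ((r :: rs).dropLast) hdroplen
      (List.replicate n 0) (List.replicate n 1) (by simp) (by simp)
    rw [PySem.List.slice_to_natCast]
    have hlentake : (ops.take n).length = n := by simp; omega
    rw [PySem.List.enumerate_eq_map_pyRange _ ""]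
    rw [PySem.List.len_eq, hlentake]
    rw [PySem.List.pyRange_zero_natCast]; simp only [List.foldl_map]
    apply PySem.List.foldl_congr_mem'
    intro j hj acc
    simp only [List.mem_range] at hj
    obtain ⟨e1, e2⟩ := h3 j hj
    simp only [PySem.List.pyGetD_natCast]
    have hopj : (ops.take n).getD j "" = ops.getD j "" := by
      rw [List.getD_eq_getElem _ _ (by omega), List.getD_eq_getElem _ _ (by omega),
        List.getElem_take]
    rw [hopj, e1, e2]
    have hz : (List.replicate n (0:Int)).getD j 0 = 0 := by
      rw [List.getD_eq_getElem _ _ (by simpa using hj)]; simp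
    have ho : (List.replicate n (1:Int)).getD j 0 = 1 := by
      rw [List.getD_eq_getElem _ _ (by simpa using hj)]; simp
    rw [hz, ho]
    simp only [pvVal]

-- ===== VERDICT (by name: the statement is the Claim_ definition above) =====
theorem part1_spec : Claim_equal_part1 := by
  intro data _ hpre
  exact pv_main data hpre.1 hpre.2.1
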